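-- pv_equiv track=rewrite | github.com/11NOel11/ChaosBench-Logic | chaosbench/tasks/multi_hop.py | _find_5hop_chains
-- ===== SOURCE A (Python) =====
-- from typing import Any, Dict, List, Tuple
--
-- def _find_5hop_chains(
--     rules: Dict[str, Dict[str, List[str]]],
--     max_chains: int = 200,
-- ) -> List[Tuple]:
--     """Find all valid 5-hop reasoning chains in the FOL rules.
--
--     Returns:
--         List of (P, Q, R, S, T, U, chain_type) tuples where:
--         - P→Q→R→S→T→U through requires (chain_type="requires_5hop") → YES
--         - P→Q→R→S→T→¬U through requires then excludes (chain_type="mixed_5hop") → NO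
--     """
--     chains = []
--
--     for p, p_rules in rules.items():
--         for q in p_rules.get("requires", []):
--             if q not in rules:
--                 continue
--             for r in rules[q].get("requires", []):
--                 if r not in rules:
--                     continue
--                 for s in rules[r].get("requires", []):
--                     if s not in rules:
--                         continue
--                     for t in rules[s].get("requires", []):
--                         if t not in rules:
--                             continue
--                         for u in rules[t].get("requires", []):
--                             if len(chains) >= max_chains:
--                                 return chains
--                             chains.append((p, q, r, s, t, u, "requires_5hop"))
--                         for u in rules[t].get("excludes", []):
--                             if len(chains) >= max_chains:
--                                 return chains
--                             chains.append((p, q, r, s, t, u, "mixed_5hop"))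
--
--     return chains
-- ===== SOURCE B (Python) =====
-- from typing import Any, Dict, List, Tuple
--
--
-- def _find_5hop_chains(
--     rules: Dict[str, Dict[str, List[str]]],
--     max_chains: int = 200,
-- ) -> List[Tuple]:
--     """Recursive DFS over the rule graph; build all chains, then truncate to the cap."""
--
--     def dfs(node, chain):
--         if len(chain) == 5:
--             p, q, r, s, t = chain
--             for u in rules[node].get("requires", []):
--                 yield (p, q, r, s, t, u, "requires_5hop")
--             for u in rules[node].get("excludes", []):
--                 yield (p, q, r, s, t, u, "mixed_5hop")
--         else:
--             for nxt in rules[node].get("requires", []):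
--                 if nxt in rules:
--                     yield from dfs(nxt, chain + [nxt])
--
--     all_chains = [c for p in rules for c in dfs(p, [p])]
--     return all_chains[: max(0, max_chains)]
-- ===== Notes on version B (the rewrite author's own statement) =====
-- stated objective: alternative
-- what changed: Replaces A's six nested loops with inline length-checks and early return by a recursive DFS generator over the rule graph that enumerates the full chain list, with the cap applied once by slicing the result.
import Mathlib
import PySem

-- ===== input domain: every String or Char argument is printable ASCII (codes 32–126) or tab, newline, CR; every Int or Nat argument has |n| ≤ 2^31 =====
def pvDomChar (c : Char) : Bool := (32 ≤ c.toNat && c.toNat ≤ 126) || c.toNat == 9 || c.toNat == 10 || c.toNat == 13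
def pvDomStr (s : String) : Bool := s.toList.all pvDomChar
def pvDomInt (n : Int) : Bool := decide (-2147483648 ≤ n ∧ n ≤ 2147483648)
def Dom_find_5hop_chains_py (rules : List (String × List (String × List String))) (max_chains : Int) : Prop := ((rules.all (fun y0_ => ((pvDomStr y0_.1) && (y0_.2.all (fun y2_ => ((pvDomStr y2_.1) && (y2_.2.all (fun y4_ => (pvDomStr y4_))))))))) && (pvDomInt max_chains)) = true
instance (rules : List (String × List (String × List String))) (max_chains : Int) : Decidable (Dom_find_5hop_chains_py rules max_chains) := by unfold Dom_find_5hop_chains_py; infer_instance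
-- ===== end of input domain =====

-- B replaces A's six nested capped loops by a recursive DFS that enumerates the whole
-- chain list and truncates once at the end (objective: alternative decomposition).

-- ===== PORT A =====

-- DecidableEq for the 7-tuple result type, built explicitly (automatic synthesis
-- exceeds the default instance-search size on this deep product)
def pvDec2 : DecidableEq (String × String) := instDecidableEqProd
def pvDec3 : DecidableEq (String × String × String) := @instDecidableEqProd _ _ instDecidableEqString pvDec2
def pvDec4 : DecidableEq (String × String × String × String) := @instDecidableEqProd _ _ instDecidableEqString pvDec3
def pvDec5 : DecidableEq (String × String × String × String × String) := @instDecidableEqProd _ _ instDecidableEqString pvDec4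
def pvDec6 : DecidableEq (String × String × String × String × String × String) := @instDecidableEqProd _ _ instDecidableEqString pvDec5
def pvDec7 : DecidableEq (String × String × String × String × String × String × String) := @instDecidableEqProd _ _ instDecidableEqString pvDec6

-- shared thin helper: Python's `edge_dict.get(key, [])` on an inner rule dict
def pvGetEdges (m : List (String × List String)) (k : String) : List String :=
  PySem.Dict.getD (PySem.Dict.mk m) k []

-- A's `if len(chains) >= max_chains: return chains` / `chains.append(x)` step;
-- the Bool is the "already returned" flag that the early `return` sets.
def pvAppendCap (n : Int)
    (st : List (String × String × String × String × String × String × String) × Bool)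
    (x : String × String × String × String × String × String × String) :
    List (String × String × String × String × String × String × String) × Bool :=
  if st.2 then st
  else if n ≤ (st.1.length : Int) then (st.1, true)
  else (st.1 ++ [x], st.2)

-- the body of A's `for t in rules[s].get("requires", [])` loop
def pvAstep4 (n : Int) (d : PySem.Dict String (List (String × List String)))
    (p q r s : String)
    (st : List (String × String × String × String × String × String × String) × Bool)
    (t : String) :
    List (String × String × String × String × String × String × String) × Bool :=
  match PySem.Dict.get? d t with
  | none => st                                         -- `if t not in rules: continue`
  | some td =>
    let st1 := (pvGetEdges td "requires").foldl
      (fun st u => pvAppendCap n st (p, q, r, s, t, u, "requires_5hop")) st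
    (pvGetEdges td "excludes").foldl
      (fun st u => pvAppendCap n st (p, q, r, s, t, u, "mixed_5hop")) st1

-- the body of A's `for s in rules[r].get("requires", [])` loop
def pvAstep3 (n : Int) (d : PySem.Dict String (List (String × List String)))
    (p q r : String)
    (st : List (String × String × String × String × String × String × String) × Bool)
    (s : String) :
    List (String × String × String × String × String × String × String) × Bool :=
  match PySem.Dict.get? d s with
  | none => st
  | some sd => (pvGetEdges sd "requires").foldl (pvAstep4 n d p q r s) st

-- the body of A's `for r in rules[q].get("requires", [])` loop
def pvAstep2 (n : Int) (d : PySem.Dict String (List (String × List String)))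
    (p q : String)
    (st : List (String × String × String × String × String × String × String) × Bool)
    (r : String) :
    List (String × String × String × String × String × String × String) × Bool :=
  match PySem.Dict.get? d r with
  | none => st
  | some rd => (pvGetEdges rd "requires").foldl (pvAstep3 n d p q r) st

-- the body of A's `for q in p_rules.get("requires", [])` loop
def pvAstep1 (n : Int) (d : PySem.Dict String (List (String × List String)))
    (p : String)
    (st : List (String × String × String × String × String × String × String) × Bool)
    (q : String) :
    List (String × String × String × String × String × String × String) × Bool :=
  match PySem.Dict.get? d q with
  | none => st
  | some qd => (pvGetEdges qd "requires").foldl (pvAstep2 n d p q) st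

def find_5hop_chains_py (rules : List (String × List (String × List String))) (max_chains : Int) : List (String × String × String × String × String × String × String) :=
  let d := PySem.Dict.mk rules
  (rules.foldl
    (fun st pr => (pvGetEdges pr.2 "requires").foldl (pvAstep1 max_chains d pr.1) st)
    ([], false)).1

-- ===== PORT B =====

-- B's recursive generator `dfs(node, chain)`; the Nat fuel is 5 - len(chain).
-- `rules[node]` is ported as getD with default []: dfs is only ever called with
-- node a key of rules (top-level keys / successors checked by `nxt in rules`).
def pvDfs (d : PySem.Dict String (List (String × List String))) :
    Nat → String → List String →
    List (String × String × String × String × String × String × String)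
  | 0, node, chain =>
    (match chain with
     | [p, q, r, s, t] =>
       (pvGetEdges (PySem.Dict.getD d node []) "requires").map
         (fun u => (p, q, r, s, t, u, "requires_5hop")) ++
       (pvGetEdges (PySem.Dict.getD d node []) "excludes").map
         (fun u => (p, q, r, s, t, u, "mixed_5hop"))
     | _ => [])
  | k + 1, node, chain =>
    (pvGetEdges (PySem.Dict.getD d node []) "requires").flatMap
      (fun nxt => if PySem.Dict.contains d nxt then pvDfs d k nxt (chain ++ [nxt]) else [])

def find_5hop_chains_py_alt (rules : List (String × List (String × List String))) (max_chains : Int) : List (String × String × String × String × String × String × String) :=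
  let d := PySem.Dict.mk rules
  ((rules.map (fun pr => pvDfs d 4 pr.1 [pr.1])).flatten).take (max 0 max_chains).toNat

-- ===== PRECONDITION & SPEC =====
-- Pre_ excludes association lists with a duplicated outer rule name: such a list cannot
-- arise from a Python dict, and A's per-entry values vs B's first-match lookup make any
-- behaviour there an accident of the encoding.
def Pre_find_5hop_chains_py (rules : List (String × List (String × List String))) (max_chains : Int) : Prop :=
  (rules.map Prod.fst).Nodup
instance (rules : List (String × List (String × List String))) (max_chains : Int) : Decidable (Pre_find_5hop_chains_py rules max_chains) := by unfold Pre_find_5hop_chains_py; infer_instance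

def pvWitness_find_5hop_chains_py : (List (String × List (String × List String))) × Int :=
  ([("a", [("requires", ["a", "b"]), ("excludes", ["b"])])], 3)

def Spec_find_5hop_chains_py (rules : List (String × List (String × List String))) (max_chains : Int) (out : List (String × String × String × String × String × String × String)) : Prop := out = find_5hop_chains_py_alt rules max_chains
instance (rules : List (String × List (String × List String))) (max_chains : Int) (out : List (String × String × String × String × String × String × String)) : Decidable (Spec_find_5hop_chains_py rules max_chains out) := by
  unfold Spec_find_5hop_chains_py
  exact @instDecidableEqList _ pvDec7 out (find_5hop_chains_py_alt rules max_chains)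

-- ===== CLAIM (what is proved, stated in full; the proofs are below) =====
def Claim_equal_find_5hop_chains_py : Prop := ∀ (rules : List (String × List (String × List String))) (max_chains : Int), Dom_find_5hop_chains_py rules max_chains → Pre_find_5hop_chains_py rules max_chains → Spec_find_5hop_chains_py rules max_chains (find_5hop_chains_py rules max_chains)

-- ===== LEMMAS AND PROOFS =====

-- once A has early-returned, nothing changes any more
theorem pv_cap_skip (n : Int)
    (l : List (String × String × String × String × String × String × String))
    (ys : List (String × String × String × String × String × String × String)) :
    List.foldl (pvAppendCap n) (l, true) ys = (l, true) := by
  induction ys with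
  | nil => rfl
  | cons x ys ih => simpa [pvAppendCap] using ih

-- the capped-append loop is `take` of the emitted stream
theorem pv_cap_run (n : Int) :
    ∀ (ys l : List (String × String × String × String × String × String × String)),
    List.foldl (pvAppendCap n) (l, false) ys
      = (l ++ ys.take (n - l.length).toNat, decide ((n - l.length).toNat < ys.length)) := by
  intro ys
  induction ys with
  | nil => intro l; simp
  | cons x ys ih =>
    intro l
    by_cases h : n ≤ (l.length : Int)
    · have hk : (n - (l.length : Int)).toNat = 0 := by omega
      simp [pvAppendCap, h, pv_cap_skip, hk]
    · have hk : (n - (l.length : Int)).toNat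
          = (n - ((l.length : Int) + 1)).toNat + 1 := by omega
      have : List.foldl (pvAppendCap n) (pvAppendCap n (l, false) x) ys
          = List.foldl (pvAppendCap n) (l ++ [x], false) ys := by
        simp [pvAppendCap, h]
      rw [List.foldl_cons, this, ih (l ++ [x])]
      refine Prod.ext ?_ ?_
      · show (l ++ [x]) ++ List.take ((n - ((l ++ [x]).length : Int)).toNat) ys
            = l ++ List.take ((n - (l.length : Int)).toNat) (x :: ys)
        have hk' : (n - ((l ++ [x]).length : Int)).toNat + 1 = (n - (l.length : Int)).toNat := by
          simp; omega
        rw [← hk']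
        simp [List.append_assoc]
      · show decide _ = decide _
        rw [decide_eq_decide]
        simp only [List.length_append, List.length_cons, List.length_nil]
        constructor <;> intro <;> omega

-- a fold whose body is itself a capped-append fold is a capped-append fold over the flatMap
theorem pv_foldl_flat {β : Type} (n : Int)
    (f : (List (String × String × String × String × String × String × String) × Bool) → β →
         (List (String × String × String × String × String × String × String) × Bool))
    (g : β → List (String × String × String × String × String × String × String)) :
    ∀ (xs : List β),
    (∀ s b, b ∈ xs → f s b = List.foldl (pvAppendCap n) s (g b)) →
    ∀ s, List.foldl f s xs = List.foldl (pvAppendCap n) s (xs.flatMap g) := by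
  intro xs
  induction xs with
  | nil => intro _ s; simp
  | cons b xs ih =>
    intro h s
    rw [List.foldl_cons, List.flatMap_cons, List.foldl_append,
      h s b (List.mem_cons_self), ih (fun s b hb => h s b (List.mem_cons_of_mem _ hb))]

theorem pv_step4 (n : Int) (d : PySem.Dict String (List (String × List String)))
    (p q r s : String) (st : _) (t : String) :
    pvAstep4 n d p q r s st t
      = List.foldl (pvAppendCap n)
          st (if PySem.Dict.contains d t then pvDfs d 0 t [p, q, r, s, t] else []) := by
  cases h : PySem.Dict.get? d t with
  | none =>
    have : PySem.Dict.contains d t = false := by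
      rw [PySem.Dict.contains_eq_isSome_get?, h]; rfl
    simp [pvAstep4, h, this]
  | some td =>
    have hc : PySem.Dict.contains d t = true := by
      rw [PySem.Dict.contains_eq_isSome_get?, h]; rfl
    have hg : PySem.Dict.getD d t [] = td := by simp [PySem.Dict.getD_eq_get?_getD, h]
    simp only [pvAstep4, h, hc, if_true, pvDfs, hg, List.foldl_append, ← List.foldl_map]

theorem pv_step3 (n : Int) (d : PySem.Dict String (List (String × List String)))
    (p q r : String) (st : _) (s : String) :
    pvAstep3 n d p q r st s
      = List.foldl (pvAppendCap n)
          st (if PySem.Dict.contains d s then pvDfs d 1 s [p, q, r, s] else []) := by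
  cases h : PySem.Dict.get? d s with
  | none =>
    have : PySem.Dict.contains d s = false := by
      rw [PySem.Dict.contains_eq_isSome_get?, h]; rfl
    simp [pvAstep3, h, this]
  | some sd =>
    have hc : PySem.Dict.contains d s = true := by
      rw [PySem.Dict.contains_eq_isSome_get?, h]; rfl
    have hg : PySem.Dict.getD d s [] = sd := by simp [PySem.Dict.getD_eq_get?_getD, h]
    simp only [pvAstep3, h, hc, if_true, pvDfs, hg, List.cons_append, List.nil_append]
    exact pv_foldl_flat n _ _ _ (fun st t _ => pv_step4 n d p q r s st t) st

theorem pv_step2 (n : Int) (d : PySem.Dict String (List (String × List String)))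
    (p q : String) (st : _) (r : String) :
    pvAstep2 n d p q st r
      = List.foldl (pvAppendCap n)
          st (if PySem.Dict.contains d r then pvDfs d 2 r [p, q, r] else []) := by
  cases h : PySem.Dict.get? d r with
  | none =>
    have : PySem.Dict.contains d r = false := by
      rw [PySem.Dict.contains_eq_isSome_get?, h]; rfl
    simp [pvAstep2, h, this]
  | some rd =>
    have hc : PySem.Dict.contains d r = true := by
      rw [PySem.Dict.contains_eq_isSome_get?, h]; rfl
    have hg : PySem.Dict.getD d r [] = rd := by simp [PySem.Dict.getD_eq_get?_getD, h]
    simp only [pvAstep2, h, hc, if_true, pvDfs, hg, List.cons_append, List.nil_append]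
    exact pv_foldl_flat n _ _ _ (fun st s _ => pv_step3 n d p q r st s) st

theorem pv_step1 (n : Int) (d : PySem.Dict String (List (String × List String)))
    (p : String) (st : _) (q : String) :
    pvAstep1 n d p st q
      = List.foldl (pvAppendCap n)
          st (if PySem.Dict.contains d q then pvDfs d 3 q [p, q] else []) := by
  cases h : PySem.Dict.get? d q with
  | none =>
    have : PySem.Dict.contains d q = false := by
      rw [PySem.Dict.contains_eq_isSome_get?, h]; rfl
    simp [pvAstep1, h, this]
  | some qd =>
    have hc : PySem.Dict.contains d q = true := by
      rw [PySem.Dict.contains_eq_isSome_get?, h]; rfl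
    have hg : PySem.Dict.getD d q [] = qd := by simp [PySem.Dict.getD_eq_get?_getD, h]
    simp only [pvAstep1, h, hc, if_true, pvDfs, hg, List.cons_append, List.nil_append]
    exact pv_foldl_flat n _ _ _ (fun st r _ => pv_step2 n d p q st r) st

-- ===== VERDICT (by name: the statement is the Claim_ definition above) =====
theorem find_5hop_chains_py_spec : Claim_equal_find_5hop_chains_py := by
  intro rules n _ hpre
  unfold Spec_find_5hop_chains_py
  simp only [find_5hop_chains_py, find_5hop_chains_py_alt]
  have hnd : (PySem.Dict.mk rules).keys.Nodup := by simpa using hpre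
  have hbody : ∀ (st : List (String × String × String × String × String × String × String) × Bool)
      (pr : String × List (String × List String)), pr ∈ rules →
      (pvGetEdges pr.2 "requires").foldl (pvAstep1 n (PySem.Dict.mk rules) pr.1) st
        = List.foldl (pvAppendCap n) st (pvDfs (PySem.Dict.mk rules) 4 pr.1 [pr.1]) := by
    intro st pr hpr
    have hg : (PySem.Dict.mk rules).getD pr.1 [] = pr.2 :=
      PySem.Dict.getD_of_mem_items (d := PySem.Dict.mk rules) (by simpa using hpr) hnd []
    simp only [pvDfs, hg]
    exact pv_foldl_flat n _ _ _ (fun st q _ => pv_step1 n (PySem.Dict.mk rules) pr.1 st q) st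
  rw [PySem.List.foldl_congr_mem
      (f := fun st pr => List.foldl (pvAstep1 n (PySem.Dict.mk rules) pr.1) st (pvGetEdges pr.2 "requires"))
      (g := fun st pr => List.foldl (pvAppendCap n) st (pvDfs (PySem.Dict.mk rules) 4 pr.1 [pr.1]))
      (init := ([], false)) (l := rules)
      (fun st pr hpr => hbody st pr hpr),
    pv_foldl_flat n _ (fun pr => pvDfs (PySem.Dict.mk rules) 4 pr.1 [pr.1]) rules
      (fun s pr _ => rfl) ([], false),
    pv_cap_run]
  have h1 : rules.flatMap (fun pr => pvDfs (PySem.Dict.mk rules) 4 pr.1 [pr.1])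
      = (rules.map (fun pr => pvDfs (PySem.Dict.mk rules) 4 pr.1 [pr.1])).flatten := by
    simp [List.flatMap_def]
  have h2 : (max 0 n).toNat = (n - ((0 : Nat) : Int)).toNat := by omega
  simp [h1, h2]
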